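-- pv_equiv track=rewrite | github.com/Rickerd1234/Advent-of-Code | 2020/Day 10/10.py | validSubCombis
-- ===== SOURCE A (Python) =====
-- import itertools
--
-- def validSubCombis(sub):
-- 	if len(sub) <= 2:
-- 		return 1
-- 	else:
-- 		rs = 0
-- 		for c in getCombis(sub[1:-1]):
-- 			if valid(sub, c):
-- 				rs += 1
-- 		return rs
--
-- def valid(sub, c):
-- 	if len(c) < 1:
-- 		return sub[-1] - sub[0] <= 3
-- 	if c[0] - sub[0] <= 3 and sub[-1] - c[-1] <= 3:
-- 		for i in range(len(sub) - 1):
-- 			if sub[i + 1] - sub[i]  > 3: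
-- 				return False
-- 		return True
-- 	return False
--
-- def getCombis(sub):
-- 	combis = []
-- 	for i in range(len(sub) + 1):
-- 		combis += list(itertools.combinations(sub, i))
-- 	return combis
-- ===== SOURCE B (Python) =====
-- def validSubCombis(sub):
--     # O(n) one-pass count: a nonempty chosen subset is valid iff its first element is
--     # within 3 of sub[0], its last within 3 of sub[-1], and all consecutive gaps of sub
--     # are <= 3; the empty subset is valid iff sub[-1] - sub[0] <= 3.
--     if len(sub) <= 2:
--         return 1
--     total = 1 if sub[-1] - sub[0] <= 3 else 0
--     if all(sub[i + 1] - sub[i] <= 3 for i in range(len(sub) - 1)):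
--         s = 0
--         for x in sub[1:-1]:
--             t = s + (1 if x - sub[0] <= 3 else 0)
--             s += t
--             if sub[-1] - x <= 3:
--                 total += t
--     return total
-- ===== Notes on version B (the rewrite author's own statement) =====
-- stated objective: faster
-- what changed: A enumerates all 2^(n-2) subsets of the interior and tests each; B uses the fact that a nonempty subset is valid iff its first/last elements satisfy the endpoint-gap bounds and the full list has all gaps <= 3, counting them in one O(n) left-to-right DP pass.
import Mathlib
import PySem

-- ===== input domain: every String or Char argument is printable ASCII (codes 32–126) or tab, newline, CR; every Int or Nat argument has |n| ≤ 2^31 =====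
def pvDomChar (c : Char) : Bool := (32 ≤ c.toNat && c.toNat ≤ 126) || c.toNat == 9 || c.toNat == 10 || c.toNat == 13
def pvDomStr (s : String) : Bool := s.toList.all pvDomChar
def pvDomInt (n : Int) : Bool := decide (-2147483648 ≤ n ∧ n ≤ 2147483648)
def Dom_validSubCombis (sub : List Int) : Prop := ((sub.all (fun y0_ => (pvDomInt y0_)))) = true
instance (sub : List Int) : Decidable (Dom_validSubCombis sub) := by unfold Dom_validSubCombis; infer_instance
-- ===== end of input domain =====

-- B replaces A's enumeration of every subset of the interior by a single O(n) counting pass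
-- (a nonempty subset's validity depends only on its first and last element and a fixed gap check).

-- ===== PORT A =====
-- itertools.combinations(sub, i): the i-element subsequences, in Python's order
def pvCombos : Nat → List Int → List (List Int)
  | 0, _ => [[]]
  | _ + 1, [] => []
  | i + 1, x :: xs => (pvCombos i xs).map (fun c => x :: c) ++ pvCombos (i + 1) xs

-- getCombis(sub)
def pvGetCombis (sub : List Int) : List (List Int) :=
  (List.range (sub.length + 1)).foldl (fun combis i => combis ++ pvCombos i sub) []

-- valid(sub, c); all indexings are in range at A's call sites (len(sub) ≥ 3, c nonempty in that branch)
def pvValid (sub c : List Int) : Bool :=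
  if c.length < 1 then
    decide (PySem.List.pyGetD sub (-1) 0 - PySem.List.pyGetD sub 0 0 ≤ 3)
  else if decide (PySem.List.pyGetD c 0 0 - PySem.List.pyGetD sub 0 0 ≤ 3)
          && decide (PySem.List.pyGetD sub (-1) 0 - PySem.List.pyGetD c (-1) 0 ≤ 3) then
    -- the for-loop with early `return False` is exactly this `all`
    (List.range (sub.length - 1)).all
      (fun i => decide (PySem.List.pyGetD sub ((i : Int) + 1) 0 - PySem.List.pyGetD sub (i : Int) 0 ≤ 3))
  else false

def validSubCombis (sub : List Int) : Int :=
  if sub.length ≤ 2 then 1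
  else
    (pvGetCombis (PySem.List.slice sub (some 1) (some (-1)))).foldl
      (fun rs c => if pvValid sub c then rs + 1 else rs) 0

-- ===== PORT B =====
def validSubCombis_alt (sub : List Int) : Int :=
  if sub.length ≤ 2 then 1
  else
    let total : Int :=
      if decide (PySem.List.pyGetD sub (-1) 0 - PySem.List.pyGetD sub 0 0 ≤ 3) then 1 else 0
    if (List.range (sub.length - 1)).all
        (fun i => decide (PySem.List.pyGetD sub ((i : Int) + 1) 0 - PySem.List.pyGetD sub (i : Int) 0 ≤ 3)) then
      ((PySem.List.slice sub (some 1) (some (-1))).foldl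
        (fun (st : Int × Int) x =>
          let t : Int := st.1 + (if decide (x - PySem.List.pyGetD sub 0 0 ≤ 3) then 1 else 0)
          (st.1 + t, st.2 + (if decide (PySem.List.pyGetD sub (-1) 0 - x ≤ 3) then t else 0)))
        (0, total)).2
    else total

-- ===== PRECONDITION & SPEC =====
def Spec_validSubCombis (sub : List Int) (out : Int) : Prop := out = validSubCombis_alt sub
instance (sub : List Int) (out : Int) : Decidable (Spec_validSubCombis sub out) := by unfold Spec_validSubCombis; infer_instance

-- ===== CLAIM (what is proved, stated in full; the proofs are below) =====
def Claim_equal_validSubCombis : Prop := ∀ (sub : List Int), Dom_validSubCombis sub → Spec_validSubCombis sub (validSubCombis sub)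

-- ===== LEMMAS AND PROOFS =====

-- abbreviations for the pieces both programs are built from
def pvCondA (sub : List Int) (x : Int) : Bool := decide (x - PySem.List.pyGetD sub 0 0 ≤ 3)
def pvCondB (sub : List Int) (x : Int) : Bool := decide (PySem.List.pyGetD sub (-1) 0 - x ≤ 3)
def pvGaps (sub : List Int) : Bool :=
  (List.range (sub.length - 1)).all
    (fun i => decide (PySem.List.pyGetD sub ((i : Int) + 1) 0 - PySem.List.pyGetD sub (i : Int) 0 ≤ 3))
def pvE0 (sub : List Int) : Bool := decide (PySem.List.pyGetD sub (-1) 0 - PySem.List.pyGetD sub 0 0 ≤ 3)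

-- number of subsequences of l satisfying P (each subsequence counted once)
def pvCnt (P : List Int → Bool) : List Int → Nat
  | [] => if P [] then 1 else 0
  | x :: xs => pvCnt (fun c => P (x :: c)) xs + pvCnt P xs

-- number of nonempty subsequences whose last element satisfies b
def pvW (b : Int → Bool) : List Int → Nat
  | [] => 0
  | x :: xs => (if b x then 1 else 0) + 2 * pvW b xs

-- number of nonempty subsequences whose first element satisfies a
def pvSA (a : Int → Bool) : List Int → Nat
  | [] => 0
  | x :: xs => (if a x then 1 else 0) * 2 ^ xs.length + pvSA a xs

-- number of nonempty subsequences with first satisfying a and last satisfying b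
def pvSAB (a b : Int → Bool) : List Int → Nat
  | [] => 0
  | x :: xs => (if a x then (if b x then 1 else 0) + pvW b xs else 0) + pvSAB a b xs

theorem pvCnt_congr (P Q : List Int → Bool) (l : List Int) (h : ∀ c, P c = Q c) :
    pvCnt P l = pvCnt Q l := by
  induction l generalizing P Q with
  | nil => simp [pvCnt, h]
  | cons x xs ih => simp [pvCnt, ih _ _ (fun c => h (x :: c)), ih _ _ h]

theorem pvCombos_big (l : List Int) : ∀ i, l.length < i → pvCombos i l = [] := by
  induction l with
  | nil => intro i hi; match i, hi with | i + 1, _ => rfl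
  | cons x xs ih =>
    intro i hi
    match i, hi with
    | i + 1, hi =>
      simp at hi
      simp [pvCombos, ih i (by omega), ih (i + 1) (by omega)]

theorem pvCombos_sum (l : List Int) (P : List Int → Bool) :
    ((List.range (l.length + 1)).map (fun i => (pvCombos i l).countP P)).sum = pvCnt P l := by
  induction l generalizing P with
  | nil => simp [pvCombos, pvCnt, List.countP_cons]
  | cons x xs ih =>
    have h2 :
        ((List.range (xs.length + 1)).map (fun i => (pvCombos (i + 1) (x :: xs)).countP P)).sum
          = ((List.range (xs.length + 1)).map (fun i => (pvCombos i xs).countP (fun c => P (x :: c)))).sum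
            + ((List.range (xs.length + 1)).map (fun i => (pvCombos (i + 1) xs).countP P)).sum := by
      simp only [pvCombos, List.countP_append, List.countP_map]
      rw [← List.sum_map_add]
      rfl
    have h3 : (if P [] then 1 else 0)
          + ((List.range (xs.length + 1)).map (fun i => (pvCombos (i + 1) xs).countP P)).sum
        = ((List.range (xs.length + 1)).map (fun i => (pvCombos i xs).countP P)).sum := by
      conv_rhs => rw [List.range_succ_eq_map]
      conv_lhs => rw [List.range_succ]
      simp [List.map_map, Function.comp_def, pvCombos_big xs (xs.length + 1) (by omega),
        pvCombos, List.countP_cons]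
    calc ((List.range (xs.length + 2)).map (fun i => (pvCombos i (x :: xs)).countP P)).sum
        = (if P [] then 1 else 0)
          + (((List.range (xs.length + 1)).map (fun i => (pvCombos i xs).countP (fun c => P (x :: c)))).sum
            + ((List.range (xs.length + 1)).map (fun i => (pvCombos (i + 1) xs).countP P)).sum) := by
          conv_lhs => rw [List.range_succ_eq_map]
          simp only [List.map_cons, List.sum_cons, List.map_map]
          rw [show ((List.range (xs.length + 1)).map
              ((fun i => (pvCombos i (x :: xs)).countP P) ∘ Nat.succ)).sum
            = ((List.range (xs.length + 1)).map (fun i => (pvCombos (i + 1) (x :: xs)).countP P)).sum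
            from rfl, h2]
          simp [pvCombos, List.countP_cons]
      _ = ((List.range (xs.length + 1)).map (fun i => (pvCombos i xs).countP (fun c => P (x :: c)))).sum
          + ((if P [] then 1 else 0)
            + ((List.range (xs.length + 1)).map (fun i => (pvCombos (i + 1) xs).countP P)).sum) := by
          ring
      _ = pvCnt (fun c => P (x :: c)) xs + pvCnt P xs := by rw [h3, ih, ih]
      _ = pvCnt P (x :: xs) := rfl

theorem pvGetCombis_countP (l : List Int) (P : List Int → Bool) :
    (pvGetCombis l).countP P = pvCnt P l := by
  rw [pvGetCombis, PySem.List.foldl_append_eq_flatMap, List.nil_append, List.flatMap,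
    List.countP_flatten, List.map_map, ← pvCombos_sum l P]
  rfl

theorem pvLastD (x : Int) (xs : List Int) :
    PySem.List.pyGetD (x :: xs) (-1) 0 = (x :: xs).getLastD 0 := by
  induction xs generalizing x with
  | nil => rfl
  | cons y ys ih =>
    simpa [PySem.List.pyGetD, PySem.List.pyGet?, PySem.List.pyIdx?, List.getLastD_cons] using ih y

theorem pvValid_eq (sub c : List Int) :
    pvValid sub c
      = if c.isEmpty then pvE0 sub
        else pvCondA sub (c.headD 0) && (pvCondB sub (c.getLastD 0) && pvGaps sub) := by
  cases c with
  | nil => simp [pvValid, pvE0]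
  | cons y ys =>
    unfold pvValid
    rw [if_neg (by simp), pvLastD y ys]
    simp only [List.isEmpty_cons, Bool.false_eq_true, if_false]
    cases hA : pvCondA sub ((y :: ys).headD 0) <;>
      cases hB : pvCondB sub ((y :: ys).getLastD 0) <;>
      simp_all [pvCondA, pvCondB, pvGaps, PySem.List.pyGetD_zero_cons]

theorem pvCnt_tail (l : List Int) (b : Int → Bool) (a e : Bool) :
    pvCnt (fun c => if c.isEmpty then e else a && b (c.getLastD 0)) l
      = (if e then 1 else 0) + (if a then pvW b l else 0) := by
  induction l generalizing e with
  | nil => cases a <;> simp [pvCnt, pvW]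
  | cons x xs ih =>
    show pvCnt (fun c => if (x :: c).isEmpty then e else a && b ((x :: c).getLastD 0)) xs
        + pvCnt (fun c => if c.isEmpty then e else a && b (c.getLastD 0)) xs = _
    rw [pvCnt_congr _ (fun c => if c.isEmpty then a && b x else a && b (c.getLastD 0)) xs
      (by intro c; cases c <;> simp), ih, ih]
    cases hA : a <;> cases hb : b x <;> cases e <;> simp [pvW, hb] <;> omega

theorem pvCnt_top (l : List Int) (bA b : Int → Bool) (e : Bool) :
    pvCnt (fun c => if c.isEmpty then e else bA (c.headD 0) && b (c.getLastD 0)) l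
      = (if e then 1 else 0) + pvSAB bA b l := by
  induction l with
  | nil => simp [pvCnt, pvSAB]
  | cons x xs ih =>
    show pvCnt (fun c => if (x :: c).isEmpty then e else bA ((x :: c).headD 0) && b ((x :: c).getLastD 0)) xs
        + pvCnt (fun c => if c.isEmpty then e else bA (c.headD 0) && b (c.getLastD 0)) xs = _
    rw [pvCnt_congr _ (fun c => if c.isEmpty then bA x && b x else bA x && b (c.getLastD 0)) xs
      (by intro c; cases c <;> simp), pvCnt_tail, ih]
    cases hA : bA x <;> cases hb : b x <;> simp [pvSAB, hA, hb] <;> omega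

theorem pvW_false (l : List Int) : pvW (fun _ => false) l = 0 := by
  induction l with
  | nil => rfl
  | cons x xs ih => simp [pvW, ih]

theorem pvSAB_gate (l : List Int) (a b : Int → Bool) (g : Bool) :
    pvSAB a (fun z => b z && g) l = if g then pvSAB a b l else 0 := by
  induction l with
  | nil => cases g <;> simp [pvSAB]
  | cons x xs ih => cases g <;> simp_all [pvSAB, pvW_false]

-- A, on lists of length ≥ 3, counts: the empty choice plus the gated pair count
theorem pvA_closed (sub : List Int) (h : ¬ sub.length ≤ 2) :
    validSubCombis sub
      = (if pvE0 sub then 1 else 0)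
        + (if pvGaps sub then (pvSAB (pvCondA sub) (pvCondB sub) (PySem.List.slice sub (some 1) (some (-1))) : Int) else 0) := by
  rw [validSubCombis, if_neg h, PySem.List.foldl_count_if, zero_add]
  rw [List.countP_congr (q := fun c =>
      if c.isEmpty then pvE0 sub
      else pvCondA sub (c.headD 0) && (pvCondB sub (c.getLastD 0) && pvGaps sub))
      (fun c _ => by rw [pvValid_eq])]
  rw [pvGetCombis_countP]
  rw [show pvCnt (fun c =>
        if c.isEmpty then pvE0 sub
        else pvCondA sub (c.headD 0) && (pvCondB sub (c.getLastD 0) && pvGaps sub))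
        (PySem.List.slice sub (some 1) (some (-1)))
      = (if pvE0 sub then 1 else 0)
        + pvSAB (pvCondA sub) (fun z => pvCondB sub z && pvGaps sub)
            (PySem.List.slice sub (some 1) (some (-1)))
    from pvCnt_top _ (pvCondA sub) (fun z => pvCondB sub z && pvGaps sub) (pvE0 sub)]
  rw [pvSAB_gate]
  cases pvE0 sub <;> cases pvGaps sub <;> simp

-- the one-pass loop invariant of B
theorem pvB_loop (l : List Int) (bA b : Int → Bool) (s t : Int) :
    (l.foldl (fun (st : Int × Int) x =>
        (st.1 + (st.1 + (if bA x then 1 else 0)),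
         st.2 + (if b x then st.1 + (if bA x then 1 else 0) else 0))) (s, t))
      = (s * 2 ^ l.length + (pvSA bA l : Int),
         t + (pvSAB bA b l : Int) + s * (pvW b l : Int)) := by
  induction l generalizing s t with
  | nil => simp [pvSA, pvSAB, pvW]
  | cons x xs ih =>
    rw [List.foldl_cons, ih]
    cases hA : bA x <;> cases hb : b x <;>
      simp only [hA, hb, pvSA, pvSAB, pvW, if_true, if_false, Bool.false_eq_true,
        Prod.mk.injEq, pow_succ, List.length_cons] <;>
      constructor <;> push_cast <;> ring

-- ===== VERDICT (by name: the statement is the Claim_ definition above) =====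
theorem validSubCombis_spec : Claim_equal_validSubCombis := by
  intro sub _
  unfold Spec_validSubCombis validSubCombis_alt
  by_cases h : sub.length ≤ 2
  · rw [validSubCombis, if_pos h, if_pos h]
  · rw [if_neg h, pvA_closed sub h]
    show _ = (if pvGaps sub then
        ((PySem.List.slice sub (some 1) (some (-1))).foldl
          (fun (st : Int × Int) x =>
            (st.1 + (st.1 + (if pvCondA sub x then 1 else 0)),
             st.2 + (if pvCondB sub x then st.1 + (if pvCondA sub x then 1 else 0) else 0)))
          (0, if pvE0 sub then 1 else 0)).2
      else (if pvE0 sub then 1 else 0))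
    rw [pvB_loop]
    cases pvGaps sub <;> simp
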